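-- pv_equiv track=rewrite | github.com/CJCP10/escenarios_sociales | Scripts/Escenarios/f_escenarios.py | get_escenario
-- ===== SOURCE A (Python) =====
-- def get_escenario(monto_estimado, monto_limite):
--   '''
--     input :
--       monto_estimado : lista
--       monto_limite   : presupuesto asignado a un producto para un año en particular
--     output
--       montos : lista de montos estimados que no superan el limite de presupuesto
--   '''
--   monto = 0
--   montos_list = []
--   for monto_i in monto_estimado:
--     if monto <= monto_limite:
--       monto = monto + monto_i
--       montos_list.append(monto_i)
--     else:
--       montos_list.append(0)
--
--   return montos_list
-- ===== SOURCE B (Python) =====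
-- def get_escenario(monto_estimado, monto_limite):
--     # Find the cutoff k: smallest index at which the running total of kept
--     # elements first exceeds the limit (latched: no re-entry afterwards).
--     k = len(monto_estimado)
--     total = 0
--     for i, v in enumerate(monto_estimado):
--         if total > monto_limite:
--             k = i
--             break
--         total += v
--     return list(monto_estimado[:k]) + [0] * (len(monto_estimado) - k)
-- ===== Notes on version B (the rewrite author's own statement) =====
-- stated objective: simpler
-- what changed: Replaces the per-element keep-or-zero branch with finding the single cutoff index where the running sum first exceeds the limit, then building the result as prefix-slice plus zero padding.
import Mathlib
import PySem

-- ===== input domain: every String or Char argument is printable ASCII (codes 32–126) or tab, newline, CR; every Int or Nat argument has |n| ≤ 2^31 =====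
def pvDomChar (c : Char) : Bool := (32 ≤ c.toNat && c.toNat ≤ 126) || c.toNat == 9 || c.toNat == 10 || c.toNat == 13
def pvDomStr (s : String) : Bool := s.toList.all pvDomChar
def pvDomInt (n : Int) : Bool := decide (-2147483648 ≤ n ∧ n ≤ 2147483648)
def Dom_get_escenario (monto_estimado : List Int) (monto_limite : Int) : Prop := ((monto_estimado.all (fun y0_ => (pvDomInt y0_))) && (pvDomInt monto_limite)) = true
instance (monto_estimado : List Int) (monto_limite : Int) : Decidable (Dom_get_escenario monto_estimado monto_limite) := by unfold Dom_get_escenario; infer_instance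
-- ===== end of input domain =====

-- B replaces A's per-element keep-or-zero branch with finding the cutoff index
-- where the running sum first exceeds the limit, then slicing and zero-padding (objective: simpler).

-- ===== PORT A =====
def get_escenario (monto_estimado : List Int) (monto_limite : Int) : List Int :=
  (monto_estimado.foldl
    (fun (s : Int × List Int) monto_i =>
      if s.1 ≤ monto_limite then (s.1 + monto_i, s.2 ++ [monto_i]) else (s.1, s.2 ++ [0]))
    (0, [])).2

-- ===== PORT B =====
-- cutoff index: smallest i at which the running total first exceeds the limit
def cutLen (xs : List Int) (total : Int) (monto_limite : Int) : Nat :=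
  match xs with
  | [] => 0
  | v :: rest => if total > monto_limite then 0 else 1 + cutLen rest (total + v) monto_limite

def get_escenario_alt (monto_estimado : List Int) (monto_limite : Int) : List Int :=
  let k := cutLen monto_estimado 0 monto_limite
  monto_estimado.take k ++ List.replicate (monto_estimado.length - k) 0

-- ===== PRECONDITION & SPEC =====
def Spec_get_escenario (monto_estimado : List Int) (monto_limite : Int) (out : List Int) : Prop := out = get_escenario_alt monto_estimado monto_limite
instance (monto_estimado : List Int) (monto_limite : Int) (out : List Int) : Decidable (Spec_get_escenario monto_estimado monto_limite out) := by unfold Spec_get_escenario; infer_instance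

-- ===== CLAIM (what is proved, stated in full; the proofs are below) =====
def Claim_equal_get_escenario : Prop := ∀ (monto_estimado : List Int) (monto_limite : Int), Dom_get_escenario monto_estimado monto_limite → Spec_get_escenario monto_estimado monto_limite (get_escenario monto_estimado monto_limite)

-- ===== LEMMAS AND PROOFS =====

-- ===== VERDICT (by name: the statement is the Claim_ definition above) =====
theorem cutLen_latch (xs : List Int) (total monto_limite : Int) (h : total > monto_limite) :
    cutLen xs total monto_limite = 0 := by
  cases xs <;> simp [cutLen, h]

theorem foldl_eq_cut (monto_limite : Int) (xs : List Int) :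
    ∀ (total : Int) (acc : List Int),
      (xs.foldl
        (fun (s : Int × List Int) monto_i =>
          if s.1 ≤ monto_limite then (s.1 + monto_i, s.2 ++ [monto_i]) else (s.1, s.2 ++ [0]))
        (total, acc)).2
      = acc ++ (xs.take (cutLen xs total monto_limite)
          ++ List.replicate (xs.length - cutLen xs total monto_limite) 0) := by
  induction xs with
  | nil => simp [cutLen]
  | cons v rest ih =>
    intro total acc
    by_cases h : total ≤ monto_limite
    · have hng : ¬ total > monto_limite := by omega
      simp only [List.foldl_cons, if_pos h]
      rw [ih (total + v) (acc ++ [v])]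
      show _ = acc ++ (List.take (cutLen (v :: rest) total monto_limite) (v :: rest)
        ++ List.replicate ((v :: rest).length - cutLen (v :: rest) total monto_limite) 0)
      rw [cutLen, if_neg hng, Nat.add_comm 1, List.take_succ_cons]
      have hlen : rest.length + 1 - (cutLen rest (total + v) monto_limite + 1)
           = rest.length - cutLen rest (total + v) monto_limite := by omega
      simp [hlen]
    · have hg : total > monto_limite := by omega
      simp [List.foldl, h, cutLen, hg, ih total (acc ++ [0]),
            cutLen_latch rest total monto_limite hg, List.replicate_succ]

theorem get_escenario_spec : Claim_equal_get_escenario := by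
  intro ms lim _
  unfold Spec_get_escenario get_escenario get_escenario_alt
  simpa using foldl_eq_cut lim ms 0 []
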